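-- pv_equiv track=rewrite | github.com/ClarkOhlenbusch/RocqCoSPOC | pipeline/config.py | is_retryable_model_error
-- ===== SOURCE A (Python) =====
-- def is_retryable_model_error(msg: str) -> bool:
--     m = msg.lower()
--     return any(s in m for s in [
--         "open router api error 404", "open router api error 408",
--         "open router api error 429", "open router api error 500",
--         "open router api error 502", "open router api error 503",
--         "open router api error 504", "open router request failed",
--         "no endpoints found",
--         "returned an empty message",
--     ])
-- ===== SOURCE B (Python) =====
-- _PATTERNS = (
--     "open router api error 404", "open router api error 408",
--     "open router api error 429", "open router api error 500",
--     "open router api error 502", "open router api error 503",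
--     "open router api error 504", "open router request failed",
--     "no endpoints found",
--     "returned an empty message",
-- )
--
--
-- def is_retryable_model_error(msg: str) -> bool:
--     # Single left-to-right pass over the positions of the lowered message:
--     # at each position, test whether any pattern starts there.
--     m = msg.lower()
--     for i in range(len(m) + 1):
--         for p in _PATTERNS:
--             if m.startswith(p, i):
--                 return True
--     return False
-- ===== Notes on version B (the rewrite author's own statement) =====
-- stated objective: alternative
-- what changed: Replaces ten independent substring scans (one per pattern) by a single position-major pass over the lowered message that tests at each position whether any pattern starts there.
import Mathlib
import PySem

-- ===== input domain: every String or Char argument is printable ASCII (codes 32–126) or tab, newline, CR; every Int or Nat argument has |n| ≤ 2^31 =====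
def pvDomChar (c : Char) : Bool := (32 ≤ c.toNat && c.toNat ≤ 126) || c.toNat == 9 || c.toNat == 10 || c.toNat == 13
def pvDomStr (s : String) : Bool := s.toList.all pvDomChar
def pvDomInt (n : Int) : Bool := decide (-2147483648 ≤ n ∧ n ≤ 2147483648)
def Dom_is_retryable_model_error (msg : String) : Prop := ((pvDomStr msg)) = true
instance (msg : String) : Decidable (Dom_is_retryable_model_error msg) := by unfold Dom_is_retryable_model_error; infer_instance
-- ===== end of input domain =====

-- B replaces A's ten independent substring scans by one position-major pass over the
-- lowered message, testing at each position whether any pattern starts there (alternative, same cost).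

-- ===== PORT A =====
def is_retryable_model_error (msg : String) : Bool :=
  let m := PySem.Str.lower msg
  ["open router api error 404", "open router api error 408",
   "open router api error 429", "open router api error 500",
   "open router api error 502", "open router api error 503",
   "open router api error 504", "open router request failed",
   "no endpoints found",
   "returned an empty message"].any (fun s => PySem.Str.isIn s m)

-- ===== PORT B =====
def pvPatterns : List String :=
  ["open router api error 404", "open router api error 408",
   "open router api error 429", "open router api error 500",
   "open router api error 502", "open router api error 503",
   "open router api error 504", "open router request failed",
   "no endpoints found",
   "returned an empty message"]

-- m.startswith(p, i) with 0 ≤ i is exactly: p is a prefix of m dropped at i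
-- (PySem.Chars.startswith on the dropped list); range(len(m)+1) with len ≥ 0 is List.range (len.toNat + 1).
def is_retryable_model_error_alt (msg : String) : Bool :=
  let m := PySem.Str.lower msg
  (List.range ((PySem.Str.len m).toNat + 1)).any (fun i =>
    pvPatterns.any (fun p => PySem.Chars.startswith (m.toList.drop i) p.toList))

-- ===== PRECONDITION & SPEC =====
def Spec_is_retryable_model_error (msg : String) (out : Bool) : Prop := out = is_retryable_model_error_alt msg
instance (msg : String) (out : Bool) : Decidable (Spec_is_retryable_model_error msg out) := by unfold Spec_is_retryable_model_error; infer_instance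

-- ===== CLAIM (what is proved, stated in full; the proofs are below) =====
def Claim_equal_is_retryable_model_error : Prop := ∀ (msg : String), Dom_is_retryable_model_error msg → Spec_is_retryable_model_error msg (is_retryable_model_error msg)

-- ===== LEMMAS AND PROOFS =====

theorem pv_any_swap {α β : Type} (xs : List α) (ys : List β) (f : α → β → Bool) :
    (xs.any fun a => ys.any fun b => f a b) = (ys.any fun b => xs.any fun a => f a b) := by
  rw [Bool.eq_iff_iff]; simp [List.any_eq_true]; tauto

-- a pattern occurs somewhere in L iff it starts at one of the positions 0..L.length
theorem pv_scan_eq_isIn (L p : List Char) :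
    ((List.range (L.length + 1)).any fun i => PySem.Chars.startswith (L.drop i) p) =
      PySem.Chars.isIn p L := by
  rw [Bool.eq_iff_iff]
  simp only [List.any_eq_true, List.mem_range, PySem.Chars.startswith_iff]
  rw [← PySem.Chars.exists_prefix_drop_iff_isIn]
  constructor
  · rintro ⟨i, _, h⟩; exact ⟨i, h⟩
  · rintro ⟨j, h⟩
    by_cases hj : j ≤ L.length
    · exact ⟨j, by omega, h⟩
    · refine ⟨L.length, by omega, ?_⟩
      rw [List.drop_eq_nil_of_le (by omega)] at h
      simp [List.prefix_nil.mp h]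

-- ===== VERDICT (by name: the statement is the Claim_ definition above) =====
theorem is_retryable_model_error_spec : Claim_equal_is_retryable_model_error := by
  intro msg _
  unfold Spec_is_retryable_model_error is_retryable_model_error is_retryable_model_error_alt pvPatterns
  simp only [PySem.Str.len_eq, Int.toNat_natCast]
  rw [pv_any_swap]
  have h : ∀ p : String,
      ((List.range ((PySem.Str.lower msg).toList.length + 1)).any fun i =>
        PySem.Chars.startswith ((PySem.Str.lower msg).toList.drop i) p.toList) =
      PySem.Str.isIn p (PySem.Str.lower msg) := by
    intro p
    rw [pv_scan_eq_isIn]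
    simp [PySem.Str.isIn]
  simp only [h]
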